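-- pv_equiv track=rewrite | github.com/django/django | django/utils/markdown.py | has_markdown_link
-- ===== SOURCE A (Python) =====
-- def find_closing_markdown_bracket(text, start):
--     """
--     Find the closing bracket corresponding to the opening bracket.
--     """
--     depth = 0
--     i = start
--     while i < len(text):
--         if text[i] == "\\":
--             i += 2
--             continue
--         if text[i] == "[":
--             depth += 1
--         elif text[i] == "]":
--             if depth == 0:
--                 return i
--             depth -= 1
--         i += 1
--     return -1
--
-- def has_markdown_link(text):
--     """
--     Check if the given text contains any Markdown links.
--     """
--
--     def is_valid_url(start, end):
--         """
--         Check if the URL is valid.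
--         """
--         url = text[start:end].strip()
--         return (
--             url.startswith("http://")
--             or url.startswith("https://")
--             or any(c.isalnum() for c in url)
--         )
--
--     i = 0
--     while i < len(text):
--         if text[i] == "\\":
--             i += 2
--             continue
--         if text[i] == "[":
--             close_bracket = find_closing_markdown_bracket(text, i + 1)
--             if (
--                 close_bracket != -1
--                 and close_bracket + 1 < len(text)
--                 and text[close_bracket + 1] == "("
--             ):
--                 j = close_bracket + 2
--                 paren_depth = 1
--                 while j < len(text):
--                     if text[j] == "\\":
--                         j += 2
--                         continue
--                     if text[j] == "(":
--                         paren_depth += 1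
--                     elif text[j] == ")":
--                         paren_depth -= 1
--                         if paren_depth == 0:
--                             if is_valid_url(close_bracket + 2, j):
--                                 return True
--                             break
--                     j += 1
--             i = close_bracket + 1 if close_bracket != -1 else i + 1
--         else:
--             i += 1
--     return False
-- ===== SOURCE B (Python) =====
-- def _matches(text, positions, opc, clc):
--     """Match opc with clc over the active positions with one stack pass."""
--     m = {}
--     stack = []
--     for p in positions:
--         if text[p] == opc:
--             stack.append(p)
--         elif text[p] == clc and stack:
--             m[stack.pop()] = p
--     return m
--
--
-- def has_markdown_link(text):
--     """
--     Check if the given text contains any Markdown links.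
--
--     Alternative algorithm: one escape-aware pass lists the scanned ("active")
--     positions, two stack passes precompute bracket and parenthesis matches,
--     and a final single scan over the active positions uses the match tables.
--     """
--     n = len(text)
--
--     def _is_valid_url(start, end):
--         url = text[start:end].strip()
--         return (
--             url.startswith("http://")
--             or url.startswith("https://")
--             or any(c.isalnum() for c in url)
--         )
--
--     # Pass 1: the positions an escape-aware scan from 0 actually visits.
--     positions = []
--     i = 0
--     while i < n:
--         positions.append(i)
--         i += 2 if text[i] == "\\" else 1
--
--     bmatch = _matches(text, positions, "[", "]")
--     pmatch = _matches(text, positions, "(", ")")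
--
--     # Final scan: table lookups instead of rescanning.
--     skip = 0
--     for p in positions:
--         if p < skip:
--             continue
--         if text[p] == "[":
--             c = bmatch.get(p)
--             if c is None:
--                 continue
--             if c + 1 < n and text[c + 1] == "(":
--                 j = pmatch.get(c + 1)
--                 if j is not None and _is_valid_url(c + 2, j):
--                     return True
--             skip = c + 1
--     return False
-- ===== Notes on version B (the rewrite author's own statement) =====
-- stated objective: alternative
-- what changed: Instead of rescanning from each opening bracket to find its closing bracket and then scanning again for the closing parenthesis, B makes one escape-aware pass to list the scanned positions, precomputes bracket and parenthesis matches with two stack passes, and then decides links in a single scan using the match tables.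
import Mathlib
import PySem

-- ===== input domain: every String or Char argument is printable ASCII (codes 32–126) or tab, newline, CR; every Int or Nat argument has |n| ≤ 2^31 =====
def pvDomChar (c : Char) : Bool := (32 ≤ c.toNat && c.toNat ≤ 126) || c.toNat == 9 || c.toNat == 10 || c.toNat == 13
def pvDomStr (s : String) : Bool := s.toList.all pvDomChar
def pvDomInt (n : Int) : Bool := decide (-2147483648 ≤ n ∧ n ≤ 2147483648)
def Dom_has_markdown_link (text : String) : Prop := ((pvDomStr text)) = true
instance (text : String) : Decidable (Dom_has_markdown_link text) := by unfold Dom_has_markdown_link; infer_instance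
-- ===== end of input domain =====

-- B changes the algorithm (precomputed bracket/paren match tables, then a single table-driven scan); return values are identical.

-- ===== PORT A =====

-- is_valid_url(start, end): identical helper in A and in B (B's _is_valid_url), shared by both ports.
def validUrl (cs : List Char) (s e : Nat) : Bool :=
  let url := PySem.Chars.strip (PySem.List.slice cs (some (s : Int)) (some (e : Int)))
  PySem.Chars.startswith url "http://".toList
    || PySem.Chars.startswith url "https://".toList
    || url.any PySem.Chars.isalnum

-- find_closing_markdown_bracket's while loop (fuel = remaining length bounds the iteration count)
def fcAux (cs : List Char) (fuel i : Nat) (depth : Int) : Int :=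
  match fuel with
  | 0 => -1
  | fuel + 1 =>
    if i < cs.length then
      if cs.getD i ' ' = '\\' then fcAux cs fuel (i + 2) depth
      else if cs.getD i ' ' = '[' then fcAux cs fuel (i + 1) (depth + 1)
      else if cs.getD i ' ' = ']' then
        if depth = 0 then (i : Int) else fcAux cs fuel (i + 1) (depth - 1)
      else fcAux cs fuel (i + 1) depth
    else -1

-- the inner paren-scanning while loop of has_markdown_link ('true' = return True, 'false' = fall through to i = close+1)
def pLoopA (cs : List Char) (close : Nat) (fuel j : Nat) (pd : Int) : Bool :=
  match fuel with
  | 0 => false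
  | fuel + 1 =>
    if j < cs.length then
      if cs.getD j ' ' = '\\' then pLoopA cs close fuel (j + 2) pd
      else if cs.getD j ' ' = '(' then pLoopA cs close fuel (j + 1) (pd + 1)
      else if cs.getD j ' ' = ')' then
        if pd - 1 = 0 then validUrl cs (close + 2) j
        else pLoopA cs close fuel (j + 1) (pd - 1)
      else pLoopA cs close fuel (j + 1) pd
    else false

-- the outer while loop of has_markdown_link
def outerA (cs : List Char) (fuel i : Nat) : Bool :=
  match fuel with
  | 0 => false
  | fuel + 1 =>
    if i < cs.length then
      if cs.getD i ' ' = '\\' then outerA cs fuel (i + 2)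
      else if cs.getD i ' ' = '[' then
        let close := fcAux cs cs.length (i + 1) 0
        let hit :=
          if close ≠ -1 ∧ close + 1 < (cs.length : Int) ∧ cs.getD (close.toNat + 1) ' ' = '(' then
            pLoopA cs close.toNat cs.length (close.toNat + 2) 1
          else false
        if hit then true
        else if close ≠ -1 then outerA cs fuel (close.toNat + 1)
        else outerA cs fuel (i + 1)
      else outerA cs fuel (i + 1)
    else false

def has_markdown_link (text : String) : Bool := outerA text.toList text.toList.length 0

-- ===== PORT B =====

-- pass 1: the positions an escape-aware scan from 0 visits (fuel bounds the iteration count)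
def posAux (cs : List Char) (fuel i : Nat) : List Nat :=
  match fuel with
  | 0 => []
  | fuel + 1 =>
    if i < cs.length then
      i :: posAux cs fuel (i + (if cs.getD i ' ' = '\\' then 2 else 1))
    else []

-- _matches: one stack pass matching opc with clc over the active positions
def matchFold (cs : List Char) (opc clc : Char) (ps st : List Nat)
    (m : PySem.Dict Nat Nat) : PySem.Dict Nat Nat :=
  match ps with
  | [] => m
  | p :: rest =>
    if cs.getD p ' ' = opc then matchFold cs opc clc rest (p :: st) m
    else if cs.getD p ' ' = clc then
      match st with
      | [] => matchFold cs opc clc rest [] m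
      | q :: st' => matchFold cs opc clc rest st' (m.insert q p)
    else matchFold cs opc clc rest st m

-- final scan over the active positions, using the match tables
def scanB (cs : List Char) (bm pm : PySem.Dict Nat Nat) (ps : List Nat) (skip : Nat) : Bool :=
  match ps with
  | [] => false
  | p :: rest =>
    if p < skip then scanB cs bm pm rest skip
    else if cs.getD p ' ' = '[' then
      match bm.get? p with
      | none => scanB cs bm pm rest skip
      | some c =>
        if c + 1 < cs.length ∧ cs.getD (c + 1) ' ' = '(' then
          match pm.get? (c + 1) with
          | some j => if validUrl cs (c + 2) j then true else scanB cs bm pm rest (c + 1)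
          | none => scanB cs bm pm rest (c + 1)
        else scanB cs bm pm rest (c + 1)
    else scanB cs bm pm rest skip

def has_markdown_link_alt (text : String) : Bool :=
  let cs := text.toList
  let ps := posAux cs cs.length 0
  let bm := matchFold cs '[' ']' ps [] PySem.Dict.empty
  let pm := matchFold cs '(' ')' ps [] PySem.Dict.empty
  scanB cs bm pm ps 0

-- ===== PRECONDITION & SPEC =====
def Spec_has_markdown_link (text : String) (out : Bool) : Prop := out = has_markdown_link_alt text
instance (text : String) (out : Bool) : Decidable (Spec_has_markdown_link text out) := by unfold Spec_has_markdown_link; infer_instance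

-- ===== CLAIM (what is proved, stated in full; the proofs are below) =====
def Claim_equal_has_markdown_link : Prop := ∀ (text : String), Dom_has_markdown_link text → Spec_has_markdown_link text (has_markdown_link text)

-- ===== LEMMAS AND PROOFS =====

-- the closers (clc positions) of l left unmatched by a stack match within l, in order
def umr (cs : List Char) (opc clc : Char) : List Nat → List Nat
  | [] => []
  | p :: rest =>
    if cs.getD p ' ' = opc then (umr cs opc clc rest).tail
    else if cs.getD p ' ' = clc then p :: umr cs opc clc rest
    else umr cs opc clc rest

-- A's scanning matcher, abstracted over a position list: first clc position closing depth d
def sm (cs : List Char) (opc clc : Char) : List Nat → Int → Option Nat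
  | [], _ => none
  | p :: rest, d =>
    if cs.getD p ' ' = opc then sm cs opc clc rest (d + 1)
    else if cs.getD p ' ' = clc then
      if d = 0 then some p else sm cs opc clc rest (d - 1)
    else sm cs opc clc rest d

def pos (cs : List Char) (i : Nat) : List Nat := posAux cs cs.length i

-- the fuel does not matter once it dominates the remaining length
theorem posAux_fuel (cs : List Char) : ∀ (f1 f2 i : Nat), cs.length - i ≤ f1 → cs.length - i ≤ f2 →
    posAux cs f1 i = posAux cs f2 i := by
  intro f1
  induction f1 with
  | zero =>
    intro f2 i h1 h2
    cases f2 with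
    | zero => rfl
    | succ f2 => simp only [posAux]; rw [if_neg (by omega)]
  | succ f1 ih =>
    intro f2 i h1 h2
    by_cases hlt : i < cs.length
    · cases f2 with
      | zero => omega
      | succ f2 =>
        simp only [posAux]
        rw [if_pos hlt, if_pos hlt]
        have hs : i < i + (if cs.getD i ' ' = '\\' then 2 else 1) := by split <;> omega
        exact congrArg (i :: ·) (ih f2 _ (by omega) (by omega))
    · cases f2 with
      | zero => simp only [posAux]; rw [if_neg hlt]
      | succ f2 => simp only [posAux]; rw [if_neg hlt, if_neg hlt]

theorem pos_eq_cons (cs : List Char) (i : Nat) (h : i < cs.length) :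
    pos cs i = i :: pos cs (i + (if cs.getD i ' ' = '\\' then 2 else 1)) := by
  unfold pos
  obtain ⟨m, hm⟩ : ∃ m, cs.length = m + 1 := ⟨cs.length - 1, by omega⟩
  rw [hm]
  simp only [posAux]
  rw [if_pos (by omega)]
  have hs : i < i + (if cs.getD i ' ' = '\\' then 2 else 1) := by split <;> omega
  exact congrArg (i :: ·) (posAux_fuel cs m (m + 1) _ (by omega) (by omega))

theorem pos_eq_nil (cs : List Char) (i : Nat) (h : ¬ i < cs.length) : pos cs i = [] := by
  unfold pos
  cases hm : cs.length with
  | zero => rfl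
  | succ m => simp only [posAux]; rw [if_neg (by omega)]

theorem pos_lb (cs : List Char) : ∀ (fuel i p : Nat), cs.length - i ≤ fuel →
    p ∈ pos cs i → i ≤ p := by
  intro fuel
  induction fuel with
  | zero =>
    intro i p hf hp
    rw [pos_eq_nil cs i (by omega)] at hp; simp at hp
  | succ fuel ih =>
    intro i p hf hp
    by_cases hlt : i < cs.length
    · rw [pos_eq_cons cs i hlt] at hp
      rcases List.mem_cons.mp hp with rfl | hp'
      · omega
      · have hs : i ≤ i + (if cs.getD i ' ' = '\\' then 2 else 1) ∧
            i < i + (if cs.getD i ' ' = '\\' then 2 else 1) := by split <;> omega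
        have := ih _ p (by omega) hp'
        omega
    · rw [pos_eq_nil cs i hlt] at hp; simp at hp

theorem pos_ub (cs : List Char) : ∀ (fuel i p : Nat), cs.length - i ≤ fuel →
    p ∈ pos cs i → p < cs.length := by
  intro fuel
  induction fuel with
  | zero =>
    intro i p hf hp
    rw [pos_eq_nil cs i (by omega)] at hp; simp at hp
  | succ fuel ih =>
    intro i p hf hp
    by_cases hlt : i < cs.length
    · rw [pos_eq_cons cs i hlt] at hp
      rcases List.mem_cons.mp hp with rfl | hp'
      · omega
      · have hs : i < i + (if cs.getD i ' ' = '\\' then 2 else 1) := by split <;> omega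
        exact ih _ p (by omega) hp'
    · rw [pos_eq_nil cs i hlt] at hp; simp at hp

theorem pos_trans (cs : List Char) : ∀ (fuel i p x : Nat), cs.length - i ≤ fuel →
    p ∈ pos cs i → x ∈ pos cs p → x ∈ pos cs i := by
  intro fuel
  induction fuel with
  | zero =>
    intro i p x hf hp hx
    rw [pos_eq_nil cs i (by omega)] at hp; simp at hp
  | succ fuel ih =>
    intro i p x hf hp hx
    by_cases hlt : i < cs.length
    · rw [pos_eq_cons cs i hlt] at hp ⊢
      rcases List.mem_cons.mp hp with rfl | hp'
      · rw [pos_eq_cons cs p hlt] at hx; exact hx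
      · have hs : i < i + (if cs.getD i ' ' = '\\' then 2 else 1) := by split <;> omega
        exact List.mem_cons_of_mem _ (ih _ p x (by omega) hp' hx)
    · rw [pos_eq_nil cs i hlt] at hp; simp at hp

theorem sm_mem (cs : List Char) (opc clc : Char) :
    ∀ (l : List Nat) (d : Int) (c : Nat), sm cs opc clc l d = some c → c ∈ l ∧ cs.getD c ' ' = clc := by
  intro l
  induction l with
  | nil => intro d c h; simp [sm] at h
  | cons p rest ih =>
    intro d c h
    rw [sm] at h
    split at h
    · have := ih _ c h; exact ⟨List.mem_cons_of_mem _ this.1, this.2⟩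
    · split at h
      · split at h
        · cases h; simp_all
        · have := ih _ c h; exact ⟨List.mem_cons_of_mem _ this.1, this.2⟩
      · have := ih _ c h; exact ⟨List.mem_cons_of_mem _ this.1, this.2⟩

theorem sm_eq_umr (cs : List Char) (opc clc : Char) :
    ∀ (l : List Nat) (d : Nat), sm cs opc clc l (d : Int) = (umr cs opc clc l)[d]? := by
  intro l
  induction l with
  | nil => intro d; simp [sm, umr]
  | cons p rest ih =>
    intro d
    rw [sm, umr]
    split
    · have : ((d : Int) + 1) = ((d + 1 : Nat) : Int) := by push_cast; ring
      rw [this, ih (d + 1), List.getElem?_tail]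
    · split
      · by_cases hd : d = 0
        · subst hd; simp
        · rw [if_neg (by exact_mod_cast hd)]
          have : ((d : Int) - 1) = ((d - 1 : Nat) : Int) := by omega
          rw [this, ih (d - 1)]
          have hd1 : d = (d - 1) + 1 := by omega
          rw [hd1, List.getElem?_cons_succ]
          have he : d - 1 + 1 - 1 = d - 1 := by omega
          rw [he]
      · exact ih d

theorem fcAux_eq (cs : List Char) : ∀ (fuel i : Nat) (d : Int), cs.length - i ≤ fuel →
    fcAux cs fuel i d = (match sm cs '[' ']' (pos cs i) d with
                    | some c => (c : Int)
                    | none => -1) := by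
  intro fuel
  induction fuel with
  | zero =>
    intro i d hf
    rw [pos_eq_nil cs i (by omega)]
    rfl
  | succ fuel ih =>
    intro i d hf
    by_cases hlt : i < cs.length
    · rw [fcAux]; rw [if_pos hlt, pos_eq_cons cs i hlt, sm]
      by_cases hc : cs.getD i ' ' = '\\'
      · rw [if_pos hc, if_pos hc, if_neg (by rw [hc]; decide), if_neg (by rw [hc]; decide)]
        exact ih (i + 2) d (by omega)
      · rw [if_neg hc, if_neg hc]
        by_cases hbr : cs.getD i ' ' = '['
        · rw [if_pos hbr, if_pos hbr]
          exact ih (i + 1) (d + 1) (by omega)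
        · rw [if_neg hbr, if_neg hbr]
          by_cases hcl : cs.getD i ' ' = ']'
          · rw [if_pos hcl, if_pos hcl]
            by_cases hd : d = 0
            · rw [if_pos hd, if_pos hd]
            · rw [if_neg hd, if_neg hd]
              exact ih (i + 1) (d - 1) (by omega)
          · rw [if_neg hcl, if_neg hcl]
            exact ih (i + 1) d (by omega)
    · rw [fcAux]; rw [if_neg hlt, pos_eq_nil cs i hlt]
      rfl

theorem pLoopA_eq (cs : List Char) (close : Nat) : ∀ (fuel j : Nat) (pd : Int), cs.length - j ≤ fuel →
    pLoopA cs close fuel j pd = (match sm cs '(' ')' (pos cs j) (pd - 1) with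
                            | some jj => validUrl cs (close + 2) jj
                            | none => false) := by
  intro fuel
  induction fuel with
  | zero =>
    intro j pd hf
    rw [pos_eq_nil cs j (by omega)]
    rfl
  | succ fuel ih =>
    intro j pd hf
    by_cases hlt : j < cs.length
    · rw [pLoopA]; rw [if_pos hlt, pos_eq_cons cs j hlt, sm]
      by_cases hc : cs.getD j ' ' = '\\'
      · rw [if_pos hc, if_pos hc, if_neg (by rw [hc]; decide), if_neg (by rw [hc]; decide)]
        exact ih (j + 2) pd (by omega)
      · rw [if_neg hc, if_neg hc]
        by_cases hop : cs.getD j ' ' = '('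
        · rw [if_pos hop, if_pos hop]
          have : pd + 1 - 1 = (pd - 1) + 1 := by ring
          rw [ih (j + 1) (pd + 1) (by omega), this]
        · rw [if_neg hop, if_neg hop]
          by_cases hcp : cs.getD j ' ' = ')'
          · rw [if_pos hcp, if_pos hcp]
            by_cases hd : pd - 1 = 0
            · rw [if_pos hd, if_pos hd]
            · rw [if_neg hd, if_neg hd]
              have : pd - 1 - 1 = (pd - 1) - 1 := by ring
              rw [ih (j + 1) (pd - 1) (by omega)]
          · rw [if_neg hcp, if_neg hcp]
            exact ih (j + 1) pd (by omega)
    · rw [pLoopA]; rw [if_neg hlt, pos_eq_nil cs j hlt]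
      rfl

theorem matchFold_nil (cs : List Char) (opc clc : Char) (st : List Nat) (m : PySem.Dict Nat Nat) :
    matchFold cs opc clc [] st m = m := by
  rw [matchFold.eq_def]

theorem matchFold_op (cs : List Char) (opc clc : Char) {p : Nat} (rest st : List Nat)
    (m : PySem.Dict Nat Nat) (hopc : cs.getD p ' ' = opc) :
    matchFold cs opc clc (p :: rest) st m = matchFold cs opc clc rest (p :: st) m := by
  rw [matchFold.eq_def]; simp only [if_pos hopc]

theorem matchFold_cl_nil (cs : List Char) (opc clc : Char) {p : Nat} (rest : List Nat)
    (m : PySem.Dict Nat Nat) (hopc : ¬ cs.getD p ' ' = opc) (hclc : cs.getD p ' ' = clc) :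
    matchFold cs opc clc (p :: rest) [] m = matchFold cs opc clc rest [] m := by
  rw [matchFold.eq_def]; simp only [if_neg hopc, if_pos hclc]

theorem matchFold_cl_cons (cs : List Char) (opc clc : Char) {p : Nat} (rest st' : List Nat)
    (q : Nat) (m : PySem.Dict Nat Nat) (hopc : ¬ cs.getD p ' ' = opc) (hclc : cs.getD p ' ' = clc) :
    matchFold cs opc clc (p :: rest) (q :: st') m = matchFold cs opc clc rest st' (m.insert q p) := by
  rw [matchFold.eq_def]; simp only [if_neg hopc, if_pos hclc]

theorem matchFold_other (cs : List Char) (opc clc : Char) {p : Nat} (rest st : List Nat)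
    (m : PySem.Dict Nat Nat) (hopc : ¬ cs.getD p ' ' = opc) (hclc : ¬ cs.getD p ' ' = clc) :
    matchFold cs opc clc (p :: rest) st m = matchFold cs opc clc rest st m := by
  rw [matchFold.eq_def]; simp only [if_neg hopc, if_neg hclc]

theorem matchFold_get (cs : List Char) (opc clc : Char)
    (hoc : opc ≠ clc) (hob : opc ≠ '\\') (hcb : clc ≠ '\\') :
    ∀ (fuel i : Nat), cs.length - i ≤ fuel → ∀ (st : List Nat) (d0 : PySem.Dict Nat Nat),
    (∀ (k : Nat) (q : Nat), st[k]? = some q →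
        sm cs opc clc (pos cs (q + 1)) 0 = (umr cs opc clc (pos cs i))[k]?) →
    st.Nodup → (∀ q ∈ st, q < i) →
    (∀ x, (x ∈ st ∨ (x ∈ pos cs i ∧ cs.getD x ' ' = opc)) → d0.get? x = none) →
    ∀ x, (matchFold cs opc clc (pos cs i) st d0).get? x =
      if x ∈ st ∨ (x ∈ pos cs i ∧ cs.getD x ' ' = opc)
      then sm cs opc clc (pos cs (x + 1)) 0
      else d0.get? x := by
  intro fuel
  induction fuel with
  | zero =>
    intro i hf st d0 hst hnd hbnd hd0 x
    have hnil : pos cs i = [] := pos_eq_nil cs i (by omega)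
    rw [hnil] at hst hd0 ⊢
    rw [matchFold_nil]
    by_cases hx : x ∈ st
    · rw [if_pos (Or.inl hx)]
      obtain ⟨k, hk⟩ := List.mem_iff_getElem?.mp hx
      have := hst k x hk
      simp [umr] at this
      rw [this, hd0 x (Or.inl hx)]
    · rw [if_neg (by rintro (h | ⟨h, _⟩); exact hx h; simp at h)]
  | succ fuel ih =>
    intro i hf st d0 hst hnd hbnd hd0 x
    by_cases hlt : i < cs.length
    · rw [pos_eq_cons cs i hlt] at hst hd0 ⊢
      by_cases hopc : cs.getD i ' ' = opc
      · -- push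
        have hite : (if cs.getD i ' ' = '\\' then 2 else 1) = 1 := by
          rw [hopc]; rw [if_neg hob]
        rw [hite] at hst hd0 ⊢
        rw [matchFold_op cs opc clc _ _ _ hopc]
        have hres := ih (i + 1) (by omega) (i :: st) d0
          (by
            intro k q hk
            match k with
            | 0 =>
              simp only [List.getElem?_cons_zero, Option.some.injEq] at hk
              subst hk
              have h0 := sm_eq_umr cs opc clc (pos cs (i + 1)) 0
              simpa using h0
            | k + 1 =>
              simp only [List.getElem?_cons_succ] at hk
              have := hst k q hk
              rw [umr] at this
              rw [if_pos hopc, List.getElem?_tail] at this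
              exact this)
          (List.nodup_cons.mpr ⟨fun h => by have := hbnd i h; omega, hnd⟩)
          (by intro q hq; rcases List.mem_cons.mp hq with rfl | h; omega; have := hbnd q h; omega)
          (by
            intro x' hx'
            apply hd0 x'
            rcases hx' with h | ⟨hm, hc⟩
            · rcases List.mem_cons.mp h with rfl | h'
              · exact Or.inr ⟨List.mem_cons_self .., hopc⟩
              · exact Or.inl h'
            · exact Or.inr ⟨List.mem_cons_of_mem _ hm, hc⟩)
          x
        rw [hres]
        have hiff : (x ∈ i :: st ∨ (x ∈ pos cs (i + 1) ∧ cs.getD x ' ' = opc)) ↔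
            (x ∈ st ∨ (x ∈ i :: pos cs (i + 1) ∧ cs.getD x ' ' = opc)) := by
          simp only [List.mem_cons]
          constructor
          · rintro ((rfl | h) | ⟨hm, hc⟩)
            · exact Or.inr ⟨Or.inl rfl, hopc⟩
            · exact Or.inl h
            · exact Or.inr ⟨Or.inr hm, hc⟩
          · rintro (h | ⟨(rfl | hm), hc⟩)
            · exact Or.inl (Or.inr h)
            · exact Or.inl (Or.inl rfl)
            · exact Or.inr ⟨hm, hc⟩
        rw [if_congr hiff rfl rfl]
      · by_cases hclc : cs.getD i ' ' = clc
        · have hite : (if cs.getD i ' ' = '\\' then 2 else 1) = 1 := by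
            rw [hclc]; rw [if_neg hcb]
          rw [hite] at hst hd0 ⊢
          match st with
          | [] =>
            rw [matchFold_cl_nil cs opc clc _ _ hopc hclc]
            have hres := ih (i + 1) (by omega) [] d0
              (by intro k q hk; simp at hk)
              (List.nodup_nil)
              (by intro q hq; simp at hq)
              (by
                intro x' hx'
                apply hd0 x'
                rcases hx' with h | ⟨hm, hc⟩
                · simp at h
                · exact Or.inr ⟨List.mem_cons_of_mem _ hm, hc⟩)
              x
            rw [hres]
            have hiff : (x ∈ ([] : List Nat) ∨ (x ∈ pos cs (i + 1) ∧ cs.getD x ' ' = opc)) ↔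
                (x ∈ ([] : List Nat) ∨ (x ∈ i :: pos cs (i + 1) ∧ cs.getD x ' ' = opc)) := by
              simp only [List.mem_cons, List.not_mem_nil, false_or]
              constructor
              · rintro ⟨hm, hc⟩; exact ⟨Or.inr hm, hc⟩
              · rintro ⟨(rfl | hm), hc⟩
                · exact absurd hc (by rw [hclc] at hc ⊢; exact fun h => hoc h.symm)
                · exact ⟨hm, hc⟩
            rw [if_congr hiff rfl rfl]
          | q :: st' =>
            rw [matchFold_cl_cons cs opc clc _ _ q _ hopc hclc]
            have hq : sm cs opc clc (pos cs (q + 1)) 0 = some i := by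
              have := hst 0 q rfl
              rw [umr] at this
              rw [if_neg hopc, if_pos hclc] at this
              simpa using this
            have hqi : q < i := hbnd q (List.mem_cons_self ..)
            have hqst' : q ∉ st' := (List.nodup_cons.mp hnd).1
            have hres := ih (i + 1) (by omega) st' (d0.insert q i)
              (by
                intro k r hk
                have := hst (k + 1) r (by simpa using hk)
                rw [umr] at this
                rw [if_neg hopc, if_pos hclc, List.getElem?_cons_succ] at this
                exact this)
              ((List.nodup_cons.mp hnd).2)
              (by intro r hr; have := hbnd r (List.mem_cons_of_mem _ hr); omega)
              (by
                intro x' hx'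
                have hne : x' ≠ q := by
                  rcases hx' with h | ⟨hm, _⟩
                  · rintro rfl; exact hqst' h
                  · have := pos_lb cs cs.length (i + 1) x' (by omega) hm; omega
                rw [PySem.Dict.get?_insert_of_ne _ _ hne]
                apply hd0 x'
                rcases hx' with h | ⟨hm, hc⟩
                · exact Or.inl (List.mem_cons_of_mem _ h)
                · exact Or.inr ⟨List.mem_cons_of_mem _ hm, hc⟩)
              x
            rw [hres]
            by_cases hxq : x = q
            · subst hxq
              rw [if_neg (by
                rintro (h | ⟨hm, _⟩)
                · exact hqst' h
                · have := pos_lb cs cs.length (i + 1) x (by omega) hm; omega)]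
              rw [PySem.Dict.get?_insert_self]
              rw [if_pos (Or.inl (List.mem_cons_self ..))]
              exact hq.symm
            · rw [PySem.Dict.get?_insert_of_ne _ _ hxq]
              have hiff : (x ∈ st' ∨ (x ∈ pos cs (i + 1) ∧ cs.getD x ' ' = opc)) ↔
                  (x ∈ q :: st' ∨ (x ∈ i :: pos cs (i + 1) ∧ cs.getD x ' ' = opc)) := by
                simp only [List.mem_cons]
                constructor
                · rintro (h | ⟨hm, hc⟩)
                  · exact Or.inl (Or.inr h)
                  · exact Or.inr ⟨Or.inr hm, hc⟩
                · rintro ((rfl | h) | ⟨(rfl | hm), hc⟩)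
                  · exact absurd rfl hxq
                  · exact Or.inl h
                  · exact absurd hc (by rw [hclc] at hc ⊢; exact fun h => hoc h.symm)
                  · exact Or.inr ⟨hm, hc⟩
              rw [if_congr hiff rfl rfl]
        · -- neither opener nor closer (includes the backslash step)
          rw [matchFold_other cs opc clc _ _ _ hopc hclc]
          have hres := ih (i + (if cs.getD i ' ' = '\\' then 2 else 1))
            (by split <;> omega) st d0
            (by
              intro k q hk
              have := hst k q hk
              rw [umr] at this
              rw [if_neg hopc, if_neg hclc] at this
              exact this)
            hnd
            (by intro q hq; have := hbnd q hq; split <;> omega)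
            (by
              intro x' hx'
              apply hd0 x'
              rcases hx' with h | ⟨hm, hc⟩
              · exact Or.inl h
              · exact Or.inr ⟨List.mem_cons_of_mem _ hm, hc⟩)
            x
          rw [hres]
          have hiff : (x ∈ st ∨ (x ∈ pos cs (i + (if cs.getD i ' ' = '\\' then 2 else 1)) ∧ cs.getD x ' ' = opc)) ↔
              (x ∈ st ∨ (x ∈ i :: pos cs (i + (if cs.getD i ' ' = '\\' then 2 else 1)) ∧ cs.getD x ' ' = opc)) := by
            simp only [List.mem_cons]
            constructor
            · rintro (h | ⟨hm, hc⟩)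
              · exact Or.inl h
              · exact Or.inr ⟨Or.inr hm, hc⟩
            · rintro (h | ⟨(rfl | hm), hc⟩)
              · exact Or.inl h
              · exact absurd hc hopc
              · exact Or.inr ⟨hm, hc⟩
          rw [if_congr hiff rfl rfl]
    · have hnil : pos cs i = [] := pos_eq_nil cs i hlt
      rw [hnil] at hst hd0 ⊢
      rw [matchFold_nil]
      by_cases hx : x ∈ st
      · rw [if_pos (Or.inl hx)]
        obtain ⟨k, hk⟩ := List.mem_iff_getElem?.mp hx
        have := hst k x hk
        simp [umr] at this
        rw [this, hd0 x (Or.inl hx)]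
      · rw [if_neg (by rintro (h | ⟨h, _⟩); exact hx h; simp at h)]

theorem scanB_all_lt (cs : List Char) (bm pm : PySem.Dict Nat Nat) :
    ∀ (l : List Nat) (t : Nat), (∀ p ∈ l, p < t) → scanB cs bm pm l t = false := by
  intro l
  induction l with
  | nil => intro t _; rw [scanB]
  | cons p rest ih =>
    intro t h
    rw [scanB]; rw [if_pos (h p (List.mem_cons_self ..))]
    exact ih t (fun q hq => h q (List.mem_cons_of_mem _ hq))

theorem scanB_skip (cs : List Char) (bm pm : PySem.Dict Nat Nat) :
    ∀ (fuel i t : Nat), cs.length - i ≤ fuel → i ≤ t → t ∈ pos cs i →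
    scanB cs bm pm (pos cs i) t = scanB cs bm pm (pos cs t) t := by
  intro fuel
  induction fuel with
  | zero =>
    intro i t hf hle ht
    rw [pos_eq_nil cs i (by omega)] at ht; simp at ht
  | succ fuel ih =>
    intro i t hf hle ht
    by_cases heq : i = t
    · rw [heq]
    · have hlt : i < cs.length := by
        by_contra hge
        rw [pos_eq_nil cs i hge] at ht; simp at ht
      rw [pos_eq_cons cs i hlt] at ht ⊢
      have ht' : t ∈ pos cs (i + (if cs.getD i ' ' = '\\' then 2 else 1)) := by
        rcases List.mem_cons.mp ht with h1 | h2
        · omega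
        · exact h2
      have hs : i < i + (if cs.getD i ' ' = '\\' then 2 else 1) ∧
          i + (if cs.getD i ' ' = '\\' then 2 else 1) ≤ t := by
        refine ⟨by split <;> omega, ?_⟩
        exact pos_lb cs (cs.length) _ t (by omega) ht'
      rw [scanB]; rw [if_pos (by omega)]
      exact ih _ t (by omega) (by omega) ht'

theorem outerA_len (cs : List Char) : ∀ (fuel i : Nat), ¬ i < cs.length → outerA cs fuel i = false := by
  intro fuel i h
  cases fuel with
  | zero => rfl
  | succ fuel => rw [outerA]; rw [if_neg h]

theorem outerA_eq_scanB (cs : List Char) :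
    ∀ (fuel i s : Nat), cs.length - i ≤ fuel → s ≤ i → (i ∈ pos cs 0 ∨ cs.length ≤ i) →
    outerA cs fuel i =
      scanB cs (matchFold cs '[' ']' (pos cs 0) [] PySem.Dict.empty)
               (matchFold cs '(' ')' (pos cs 0) [] PySem.Dict.empty)
               (pos cs i) s := by
  have hbm : ∀ x, x ∈ pos cs 0 → cs.getD x ' ' = '[' →
      (matchFold cs '[' ']' (pos cs 0) [] PySem.Dict.empty).get? x =
        sm cs '[' ']' (pos cs (x + 1)) 0 := by
    intro x hx hc
    have h := matchFold_get cs '[' ']' (by decide) (by decide) (by decide) cs.length 0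
      (by omega) [] PySem.Dict.empty (by intro k q hk; simp at hk) List.nodup_nil
      (by intro q hq; simp at hq) (by intro y _; simp) x
    rw [h, if_pos (Or.inr ⟨hx, hc⟩)]
  have hpm : ∀ x, x ∈ pos cs 0 → cs.getD x ' ' = '(' →
      (matchFold cs '(' ')' (pos cs 0) [] PySem.Dict.empty).get? x =
        sm cs '(' ')' (pos cs (x + 1)) 0 := by
    intro x hx hc
    have h := matchFold_get cs '(' ')' (by decide) (by decide) (by decide) cs.length 0
      (by omega) [] PySem.Dict.empty (by intro k q hk; simp at hk) List.nodup_nil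
      (by intro q hq; simp at hq) (by intro y _; simp) x
    rw [h, if_pos (Or.inr ⟨hx, hc⟩)]
  intro fuel
  induction fuel with
  | zero =>
    intro i s hf hs hi
    rw [pos_eq_nil cs i (by omega), scanB]
    rfl
  | succ fuel ih =>
    intro i s hf hs hi
    by_cases hlt : i < cs.length
    · have hiact : i ∈ pos cs 0 := hi.resolve_right (by omega)
      have htr : ∀ j, j ∈ pos cs i → j ∈ pos cs 0 := fun j hj =>
        pos_trans cs cs.length 0 i j (by omega) hiact hj
      rw [outerA]; rw [if_pos hlt, pos_eq_cons cs i hlt, scanB,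
        if_neg (show ¬ i < s by omega)]
      by_cases hbs : cs.getD i ' ' = '\\'
      · have hstep : (if cs.getD i ' ' = '\\' then 2 else 1) = 2 := if_pos hbs
        rw [hstep, if_pos hbs, if_neg (show ¬ cs.getD i ' ' = '[' by rw [hbs]; decide)]
        refine ih (i + 2) s (by omega) (by omega) ?_
        by_cases h2 : i + 2 < cs.length
        · left
          refine htr (i + 2) ?_
          rw [pos_eq_cons cs i hlt, hstep, pos_eq_cons cs (i + 2) h2]
          simp
        · right; omega
      · have hstep : (if cs.getD i ' ' = '\\' then 2 else 1) = 1 := if_neg hbs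
        rw [hstep, if_neg hbs]
        by_cases hbr : cs.getD i ' ' = '['
        · rw [if_pos hbr, if_pos hbr]
          have hmemnext : ∀ j, j ∈ pos cs (i + 1) → j ∈ pos cs i := by
            intro j hj
            rw [pos_eq_cons cs i hlt, hstep]
            exact List.mem_cons_of_mem _ hj
          rw [fcAux_eq cs cs.length (i + 1) 0 (by omega), hbm i hiact hbr]
          cases hsm : sm cs '[' ']' (pos cs (i + 1)) 0 with
          | none =>
            norm_num
            refine ih (i + 1) s (by omega) (by omega) ?_
            by_cases h1 : i + 1 < cs.length
            · left
              refine htr (i + 1) ?_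
              rw [pos_eq_cons cs i hlt, hstep, pos_eq_cons cs (i + 1) h1]
              simp
            · right; omega
          | some c =>
            simp only []
            have hcm := sm_mem cs '[' ']' (pos cs (i + 1)) 0 c hsm
            have hclb : i + 1 ≤ c := pos_lb cs cs.length (i + 1) c (by omega) hcm.1
            have hcub : c < cs.length := pos_ub cs cs.length (i + 1) c (by omega) hcm.1
            have hcact : c ∈ pos cs 0 := htr c (hmemnext c hcm.1)
            have hne : ((c : Int)) ≠ -1 := by omega
            have htn : ((c : Int)).toNat = c := by omega
            have hcont : ∀ hc1 : c + 1 ≤ cs.length,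
                outerA cs fuel (c + 1) =
                  scanB cs (matchFold cs '[' ']' (pos cs 0) [] PySem.Dict.empty)
                    (matchFold cs '(' ')' (pos cs 0) [] PySem.Dict.empty)
                    (pos cs (i + 1)) (c + 1) := by
              intro hc1
              by_cases hc2 : c + 1 < cs.length
              · have hc1m : c + 1 ∈ pos cs c := by
                  rw [pos_eq_cons cs c hcub,
                    show (if cs.getD c ' ' = '\\' then 2 else 1) = 1 from
                      if_neg (by rw [hcm.2]; decide),
                    pos_eq_cons cs (c + 1) hc2]
                  simp
                have hc1i : c + 1 ∈ pos cs (i + 1) :=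
                  pos_trans cs cs.length (i + 1) c (c + 1) (by omega) hcm.1 hc1m
                rw [scanB_skip cs _ _ cs.length (i + 1) (c + 1) (by omega) (by omega) hc1i]
                exact ih (c + 1) (c + 1) (by omega) (by omega)
                  (Or.inl (htr (c + 1) (hmemnext (c + 1) hc1i)))
              · have hcn : c + 1 = cs.length := by omega
                rw [outerA_len cs fuel (c + 1) (by omega)]
                rw [scanB_all_lt cs _ _ (pos cs (i + 1)) (c + 1)
                  (fun p hp => by have := pos_ub cs cs.length (i + 1) p (by omega) hp; omega)]
            by_cases hpar : c + 1 < cs.length ∧ cs.getD (c + 1) ' ' = '('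
            · rw [if_pos hpar]
              have hc1m : c + 1 ∈ pos cs c := by
                rw [pos_eq_cons cs c hcub,
                  show (if cs.getD c ' ' = '\\' then 2 else 1) = 1 from
                    if_neg (by rw [hcm.2]; decide),
                  pos_eq_cons cs (c + 1) hpar.1]
                simp
              have hc1i : c + 1 ∈ pos cs (i + 1) :=
                pos_trans cs cs.length (i + 1) c (c + 1) (by omega) hcm.1 hc1m
              have hc1act : c + 1 ∈ pos cs 0 := htr (c + 1) (hmemnext (c + 1) hc1i)
              rw [hpm (c + 1) hc1act hpar.2]
              have hcond : (c : Int) ≠ -1 ∧ (c : Int) + 1 < (cs.length : Int) ∧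
                  cs.getD ((c : Int).toNat + 1) ' ' = '(' := by
                refine ⟨hne, by omega, ?_⟩
                rw [htn]; exact hpar.2
              rw [if_pos hcond, htn]
              rw [pLoopA_eq cs c cs.length (c + 2) 1 (by omega)]
              rw [show (1 : Int) - 1 = 0 by norm_num]
              cases hsp : sm cs '(' ')' (pos cs (c + 2)) 0 with
              | none =>
                simp only [Bool.false_eq_true, if_false]
                rw [if_pos hne]
                exact hcont (by omega)
              | some j =>
                simp only []
                by_cases hv : validUrl cs (c + 2) j = true
                · rw [if_pos hv, if_pos hv]
                · rw [if_neg hv, if_neg hv, if_pos hne]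
                  exact hcont (by omega)
            · rw [if_neg hpar]
              have hcond : ¬ ((c : Int) ≠ -1 ∧ (c : Int) + 1 < (cs.length : Int) ∧
                  cs.getD ((c : Int).toNat + 1) ' ' = '(') := by
                rw [htn]
                rintro ⟨-, h1, h2⟩
                exact hpar ⟨by omega, h2⟩
              rw [if_neg hcond]
              simp only [Bool.false_eq_true, if_false]
              rw [if_pos hne, htn]
              exact hcont (by omega)
        · rw [if_neg hbr, if_neg hbr]
          refine ih (i + 1) s (by omega) (by omega) ?_
          by_cases h1 : i + 1 < cs.length
          · left
            refine htr (i + 1) ?_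
            rw [pos_eq_cons cs i hlt, hstep, pos_eq_cons cs (i + 1) h1]
            simp
          · right; omega
    · rw [outerA_len cs (fuel + 1) i hlt, pos_eq_nil cs i hlt, scanB]

-- ===== VERDICT (by name: the statement is the Claim_ definition above) =====
theorem has_markdown_link_spec : Claim_equal_has_markdown_link := by
  intro text _
  unfold Spec_has_markdown_link has_markdown_link has_markdown_link_alt
  simp only []
  by_cases h0 : 0 < text.toList.length
  · exact outerA_eq_scanB text.toList (text.toList.length) 0 0 (by omega) (by omega)
      (Or.inl (by rw [pos_eq_cons text.toList 0 h0]; simp))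
  · exact outerA_eq_scanB text.toList (text.toList.length) 0 0 (by omega) (by omega)
      (Or.inr (by omega))
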